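-- pv_equiv track=rewrite | github.com/matteovar/Facul | faculdade/Arquivos not e pc/Antigos/Python-Mackenzie/segundo semestre python/sort.py | abaixo_da_diagonal
-- ===== SOURCE A (Python) =====
-- def abaixo_da_diagonal(matriz):
--     soma = 0
--     for i in range(len(matriz)):
--         for j in range(len(matriz)):
--             if len(matriz)-1 == j + i:
--                 soma += matriz[i][j]
--             else:
--                 if i + j > len(matriz)-1:
--                     soma += matriz[i][j]
--     return soma
-- ===== SOURCE B (Python) =====
-- def abaixo_da_diagonal(matriz):
--     n = len(matriz)
--     soma = 0
--     for d in range(n - 1, 2 * n - 1):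
--         for i in range(d - n + 1, n):
--             soma += matriz[i][d - i]
--     return soma
-- ===== Notes on version B (the rewrite author's own statement) =====
-- stated objective: faster
-- what changed: B traverses the lower-right triangle anti-diagonal by anti-diagonal (outer loop over d = i+j from n-1 to 2n-2) instead of A's full row-by-row n-by-n scan with a per-element inequality test, visiting only the triangle's cells.
import Mathlib
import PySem

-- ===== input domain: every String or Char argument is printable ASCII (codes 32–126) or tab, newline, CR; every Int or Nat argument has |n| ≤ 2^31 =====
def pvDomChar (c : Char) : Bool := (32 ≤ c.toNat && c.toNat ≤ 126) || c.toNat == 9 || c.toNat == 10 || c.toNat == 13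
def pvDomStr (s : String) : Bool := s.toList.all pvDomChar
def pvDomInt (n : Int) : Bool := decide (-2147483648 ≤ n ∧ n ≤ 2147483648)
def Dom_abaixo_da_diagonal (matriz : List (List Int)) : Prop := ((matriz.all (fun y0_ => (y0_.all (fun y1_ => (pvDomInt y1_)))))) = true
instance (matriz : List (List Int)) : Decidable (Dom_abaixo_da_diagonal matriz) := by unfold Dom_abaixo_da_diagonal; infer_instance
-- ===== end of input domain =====

-- B traverses the triangle anti-diagonal by anti-diagonal (d = i + j from n-1 to 2n-2)
-- instead of A's full row-by-row n×n scan with a per-element inequality test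
-- (alternative decomposition; the proof shows the traversal order does not matter).

-- ===== PORT A =====
def abaixo_da_diagonal (matriz : List (List Int)) : Int :=
  (PySem.List.pyRange 0 (matriz.length : Int) 1).foldl (fun soma i =>
    (PySem.List.pyRange 0 (matriz.length : Int) 1).foldl (fun soma j =>
      if (matriz.length : Int) - 1 = j + i then
        soma + PySem.List.pyGetD (PySem.List.pyGetD matriz i []) j 0
      else if i + j > (matriz.length : Int) - 1 then
        soma + PySem.List.pyGetD (PySem.List.pyGetD matriz i []) j 0
      else soma) soma) 0

-- ===== PORT B =====
def abaixo_da_diagonal_alt (matriz : List (List Int)) : Int :=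
  (PySem.List.pyRange ((matriz.length : Int) - 1) (2 * (matriz.length : Int) - 1) 1).foldl
    (fun soma d =>
      (PySem.List.pyRange (d - (matriz.length : Int) + 1) (matriz.length : Int) 1).foldl
        (fun soma i =>
          soma + PySem.List.pyGetD (PySem.List.pyGetD matriz i []) (d - i) 0) soma) 0

-- ===== PRECONDITION & SPEC =====
-- Pre_ excludes exactly the ragged inputs on which Python A raises IndexError
-- (some row is shorter than the number of rows); Python B raises there identically.
def Pre_abaixo_da_diagonal (matriz : List (List Int)) : Prop :=
  ∀ row ∈ matriz, matriz.length ≤ row.length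
instance (matriz : List (List Int)) : Decidable (Pre_abaixo_da_diagonal matriz) := by
  unfold Pre_abaixo_da_diagonal; infer_instance
def pvWitness_abaixo_da_diagonal : List (List Int) := [[1, 2], [3, 4]]

def Spec_abaixo_da_diagonal (matriz : List (List Int)) (out : Int) : Prop := out = abaixo_da_diagonal_alt matriz
instance (matriz : List (List Int)) (out : Int) : Decidable (Spec_abaixo_da_diagonal matriz out) := by unfold Spec_abaixo_da_diagonal; infer_instance

-- ===== CLAIM (what is proved, stated in full; the proofs are below) =====
def Claim_equal_abaixo_da_diagonal : Prop := ∀ (matriz : List (List Int)), Dom_abaixo_da_diagonal matriz → Pre_abaixo_da_diagonal matriz → Spec_abaixo_da_diagonal matriz (abaixo_da_diagonal matriz)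

-- ===== LEMMAS AND PROOFS =====

-- A's inner loop: the two additive branches are a single conditional add (n-1 ≤ i+j).
theorem branch_eq (n i : Int) (g : Int → Int) (a j : Int) :
    (if n - 1 = j + i then a + g j else if i + j > n - 1 then a + g j else a)
      = a + (if n - 1 ≤ i + j then g j else 0) := by
  split_ifs <;> first | rfl | omega

-- Conditional sum over the full range [0, n) equals the plain sum over [a, n), 0 ≤ a ≤ n.
theorem sum_ite_range (n a : Int) (h : Int → Int) (h0 : 0 ≤ a) (h1 : a ≤ n) :
    ((PySem.List.pyRange 0 n 1).map (fun i => if a ≤ i then h i else 0)).sum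
      = ((PySem.List.pyRange a n 1).map h).sum := by
  rw [PySem.List.pyRange_one_append 0 a n h0 h1, List.map_append, List.sum_append,
      List.map_congr_left (l := PySem.List.pyRange 0 a 1)
        (g := fun _ => (0 : Int)) (fun i hi => by
          have := PySem.List.mem_pyRange_one.mp hi
          exact if_neg (by omega)),
      List.map_congr_left (l := PySem.List.pyRange a n 1) (g := h) (fun i hi => by
          have := PySem.List.mem_pyRange_one.mp hi
          exact if_pos (by omega))]
  simp

-- The triangle {(i,j) | 0 ≤ i,j < n, i+j ≥ n-1} summed row-by-row with a conditional
-- equals the same triangle summed anti-diagonal by anti-diagonal (d = i+j): the core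
-- reordering behind A = B, for an arbitrary cell function F.
theorem tri_reorder (F : Int → Int → Int) (N : Nat) :
    (PySem.List.pyRange 0 (N : Int) 1).foldl (fun soma i =>
      (PySem.List.pyRange 0 (N : Int) 1).foldl (fun soma j =>
        if (N : Int) - 1 = j + i then soma + F i j
        else if i + j > (N : Int) - 1 then soma + F i j
        else soma) soma) 0
    = (PySem.List.pyRange ((N : Int) - 1) (2 * (N : Int) - 1) 1).foldl (fun soma d =>
        (PySem.List.pyRange (d - (N : Int) + 1) (N : Int) 1).foldl
          (fun soma i => soma + F i (d - i)) soma) 0 := by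
  -- Both sides as sums of maps.
  have hA : (PySem.List.pyRange 0 (N : Int) 1).foldl (fun soma i =>
      (PySem.List.pyRange 0 (N : Int) 1).foldl (fun soma j =>
        if (N : Int) - 1 = j + i then soma + F i j
        else if i + j > (N : Int) - 1 then soma + F i j
        else soma) soma) 0
    = ((PySem.List.pyRange 0 (N : Int) 1).map (fun i =>
        ((PySem.List.pyRange 0 (N : Int) 1).map
          (fun j => if (N : Int) - 1 ≤ i + j then F i j else 0)).sum)).sum := by
    rw [PySem.List.foldl_congr_mem _ _ (fun soma i => soma +
        ((PySem.List.pyRange 0 (N : Int) 1).map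
          (fun j => if (N : Int) - 1 ≤ i + j then F i j else 0)).sum) 0
      (fun acc i _ => by
        rw [PySem.List.foldl_congr_mem _ _ (fun a j => a +
              (if (N : Int) - 1 ≤ i + j then F i j else 0)) acc
            (fun a j _ => branch_eq (N : Int) i (F i) a j),
          PySem.List.foldl_add]),
      PySem.List.foldl_add, zero_add]
  have hB : (PySem.List.pyRange ((N : Int) - 1) (2 * (N : Int) - 1) 1).foldl (fun soma d =>
      (PySem.List.pyRange (d - (N : Int) + 1) (N : Int) 1).foldl
        (fun soma i => soma + F i (d - i)) soma) 0
    = ((PySem.List.pyRange ((N : Int) - 1) (2 * (N : Int) - 1) 1).map (fun d =>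
        ((PySem.List.pyRange 0 (N : Int) 1).map
          (fun i => if d - (N : Int) + 1 ≤ i then F i (d - i) else 0)).sum)).sum := by
    rw [PySem.List.foldl_congr_mem _ _ (fun soma d => soma +
        ((PySem.List.pyRange 0 (N : Int) 1).map
          (fun i => if d - (N : Int) + 1 ≤ i then F i (d - i) else 0)).sum) 0
      (fun acc d hd => by
        have hdb := PySem.List.mem_pyRange_one.mp hd
        rw [PySem.List.foldl_add, ← sum_ite_range _ _ _ (by omega) (by omega)]),
      PySem.List.foldl_add, zero_add]
  rw [hA, hB]
  -- Reindex both pyRanges by List.range N and pass to Finset.range sums.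
  have hlen1 : ((N : Int) - 0).toNat = N := by omega
  have hlen2 : (2 * (N : Int) - 1 - ((N : Int) - 1)).toNat = N := by omega
  have bridge : ∀ (g : Nat → Int), ((List.range N).map g).sum = ∑ k ∈ Finset.range N, g k :=
    fun g => rfl
  rw [PySem.List.pyRange_one 0 (N : Int), PySem.List.pyRange_one ((N : Int) - 1) _,
      hlen1, hlen2, List.map_map, List.map_map, bridge, bridge]
  simp only [Function.comp_def, zero_add]
  simp only [List.map_map, Function.comp_def, bridge]
  conv_rhs => rw [Finset.sum_comm]
  refine Finset.sum_congr rfl (fun i hi => ?_)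
  have hiN := Finset.mem_range.mp hi
  -- Fixed row i: the conditional sum over columns is the segment [N-1-i, N),
  -- and the conditional sum over diagonals t is the segment [0, i+1); they
  -- enumerate the same cells via j = N-1-i+t.
  rw [← Finset.sum_filter, ← Finset.sum_filter]
  have hf1 : (Finset.range N).filter (fun (j : Nat) => (N : Int) - 1 ≤ (i : Int) + (j : Int))
      = Finset.Ico (N - 1 - i) N := by
    ext j
    simp only [Finset.mem_filter, Finset.mem_range, Finset.mem_Ico]
    omega
  have hf2 : (Finset.range N).filter
      (fun (t : Nat) => (N : Int) - 1 + (t : Int) - (N : Int) + 1 ≤ (i : Int))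
      = Finset.range (i + 1) := by
    ext t
    simp only [Finset.mem_filter, Finset.mem_range]
    omega
  rw [hf1, hf2, Finset.sum_Ico_eq_sum_range]
  have hcount : N - (N - 1 - i) = i + 1 := by omega
  rw [hcount]
  refine Finset.sum_congr rfl (fun t ht => ?_)
  have htI := Finset.mem_range.mp ht
  congr 1
  omega

-- ===== VERDICT (by name: the statement is the Claim_ definition above) =====
theorem abaixo_da_diagonal_spec : Claim_equal_abaixo_da_diagonal := by
  intro matriz _ _
  unfold Spec_abaixo_da_diagonal abaixo_da_diagonal abaixo_da_diagonal_alt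
  exact tri_reorder (fun i j => PySem.List.pyGetD (PySem.List.pyGetD matriz i []) j 0)
    matriz.length
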